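-- pv_equiv track=rewrite | github.com/fogmaze/learner | source/core.py | splitBlank
-- ===== SOURCE A (Python) =====
-- from typing import Tuple,List
--
-- def splitBlank(str:str)->List[str]:
--     res = []
--     inMark = False
--     lastBlank = 0
--     for i in range(len(str)):
--         if str[i] == ' ' and not inMark:
--             res.append(str[lastBlank:i].replace('"',''))
--             lastBlank = i + 1
--         elif str[i] == '"':
--             if inMark:
--                 inMark = False
--             else:
--                 inMark = True
--         if i+1 == len(str):
--             res.append(str[lastBlank:i+1].replace('"',''))
--     return res
-- ===== SOURCE B (Python) =====
-- from typing import List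
--
-- def splitBlank(str: str) -> List[str]:
--     # character-accumulation state machine: build each token in a buffer,
--     # toggle quote mode on '"' (never emitting the quote), split on unquoted spaces
--     res = []
--     buf = ""
--     inMark = False
--     for c in str:
--         if c == '"':
--             inMark = not inMark
--         elif c == ' ' and not inMark:
--             res.append(buf)
--             buf = ""
--         else:
--             buf += c
--     if str:
--         res.append(buf)
--     return res
-- ===== Notes on version B (the rewrite author's own statement) =====
-- stated objective: simpler
-- what changed: Replaces A's slice-index bookkeeping (a lastBlank pointer, slicing the token out of the string and a per-token replace pass that strips quote characters) by a single character-accumulation state machine that builds each token in a buffer and simply never appends quote characters.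
import Mathlib
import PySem

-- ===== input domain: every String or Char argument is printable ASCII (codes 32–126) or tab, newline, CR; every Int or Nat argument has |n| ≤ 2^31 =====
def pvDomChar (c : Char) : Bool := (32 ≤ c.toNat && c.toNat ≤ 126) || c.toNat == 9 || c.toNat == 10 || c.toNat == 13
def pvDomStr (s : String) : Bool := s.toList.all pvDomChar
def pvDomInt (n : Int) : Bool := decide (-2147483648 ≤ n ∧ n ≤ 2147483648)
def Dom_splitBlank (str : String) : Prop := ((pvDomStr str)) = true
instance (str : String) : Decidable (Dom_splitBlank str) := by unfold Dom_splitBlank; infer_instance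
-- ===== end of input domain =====

-- B replaces A's slice-index tracking (lastBlank + str[lastBlank:i].replace) by a
-- character-accumulation state machine with a token buffer; objective: simpler, same O(n) cost.


-- ===== PORT A =====
-- one iteration of A's `for i in range(len(str))` body; state = (res, inMark, lastBlank)
-- the if/elif on str[i]; state = (res, inMark, lastBlank)
def splitBlankStep1 (str : String) (s : List String × Bool × Int) (i : Int) :
    List String × Bool × Int :=
  if PySem.Str.pyGet? str i = some ' ' ∧ s.2.1 = false then
    (s.1 ++ [PySem.Str.replace (PySem.Str.slice str (some s.2.2) (some i)) "\"" ""], s.2.1, i + 1)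
  else if PySem.Str.pyGet? str i = some '"' then
    (s.1, if s.2.1 then false else true, s.2.2)
  else s

-- the trailing `if i+1 == len(str)` append, after the if/elif
def splitBlankStep (str : String) (n : Int) (s : List String × Bool × Int) (i : Int) :
    List String × Bool × Int :=
  if i + 1 = n then
    ((splitBlankStep1 str s i).1 ++
      [PySem.Str.replace (PySem.Str.slice str (some (splitBlankStep1 str s i).2.2) (some (i + 1))) "\"" ""],
     (splitBlankStep1 str s i).2.1, (splitBlankStep1 str s i).2.2)
  else splitBlankStep1 str s i

def splitBlank (str : String) : List String :=
  ((PySem.List.pyRange 0 (PySem.Str.len str) 1).foldl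
      (splitBlankStep str (PySem.Str.len str)) ([], false, 0)).1

-- ===== PORT B =====
-- one iteration of B's `for c in str` body; state = (res, buf, inMark)
def splitBlankAltStep (s : List String × List Char × Bool) (c : Char) :
    List String × List Char × Bool :=
  if c = '"' then (s.1, s.2.1, !s.2.2)
  else if c = ' ' ∧ s.2.2 = false then (s.1 ++ [String.ofList s.2.1], [], s.2.2)
  else (s.1, s.2.1 ++ [c], s.2.2)

def splitBlank_alt (str : String) : List String :=
  let st := str.toList.foldl splitBlankAltStep ([], [], false)
  if str.toList ≠ [] then st.1 ++ [String.ofList st.2.1] else st.1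

-- ===== PRECONDITION & SPEC =====
def Spec_splitBlank (str : String) (out : List String) : Prop := out = splitBlank_alt str
instance (str : String) (out : List String) : Decidable (Spec_splitBlank str out) := by unfold Spec_splitBlank; infer_instance

-- ===== CLAIM (what is proved, stated in full; the proofs are below) =====
def Claim_equal_splitBlank : Prop := ∀ (str : String), Dom_splitBlank str → Spec_splitBlank str (splitBlank str)

-- ===== LEMMAS AND PROOFS =====

-- `.replace('"','')` deletes every '"': the find-and-substitute loop is a filter
lemma replace_go_quote (fuel : Nat) : ∀ (l : List Char) (acc : List Char), l.length ≤ fuel →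
    PySem.Chars.replace.go ['"'] [] fuel l acc
      = acc.reverse ++ l.filter (fun c => !(c == '"')) := by
  induction fuel with
  | zero =>
    intro l acc h
    have : l = [] := List.eq_nil_of_length_eq_zero (Nat.le_zero.mp h)
    subst this
    simp [PySem.Chars.replace.go]
  | succ fuel ih =>
    intro l acc h
    cases l with
    | nil => simp [PySem.Chars.replace.go]
    | cons c t =>
      by_cases hc : c = '"'
      · subst hc
        have hp : List.isPrefixOf ['"'] ('"' :: t) = true := by
          simp [List.isPrefixOf]
        simp only [PySem.Chars.replace.go, hp, if_true]
        rw [show (List.drop (List.length ['"']) ('"' :: t)) = t by simp]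
        simp only [List.reverse_nil, List.nil_append]
        rw [ih t acc (by simpa using Nat.le_of_succ_le_succ h)]
        simp
      · have hp : List.isPrefixOf ['"'] (c :: t) = false := by
          simp only [List.isPrefixOf]
          simp
          exact fun hcc => hc hcc.symm
        simp only [PySem.Chars.replace.go, hp, Bool.false_eq_true, if_false]
        rw [ih t (c :: acc) (by simpa using Nat.le_of_succ_le_succ h)]
        simp [hc]

lemma replace_quote (l : List Char) :
    PySem.Chars.replace l ['"'] [] = l.filter (fun c => !(c == '"')) := by
  rw [PySem.Chars.replace]
  rw [if_neg (by simp)]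
  simpa using replace_go_quote l.length l [] (le_refl _)

-- the token A emits for the slice [lb, k) equals the buffer B accumulated over it
lemma token_eq (str : String) (lb k : Nat) :
    PySem.Str.replace (PySem.Str.slice str (some (lb : Int)) (some (k : Int))) "\"" ""
      = String.ofList (((str.toList.drop lb).take (k - lb)).filter (fun c => !(c == '"'))) := by
  have h1 : (PySem.Str.slice str (some (lb : Int)) (some (k : Int))).toList
      = (str.toList.drop lb).take (k - lb) := by
    simp [PySem.Str.slice]
    rw [PySem.List.slice_toNat _ (Int.natCast_nonneg _) (Int.natCast_nonneg _)]
    simp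
  rw [PySem.Str.replace, h1]
  rw [show ("\"" : String).toList = ['"'] by decide, show ("" : String).toList = [] by decide,
    replace_quote]

-- appending one more character to the slice
lemma seg_succ (cs : List Char) (lb k : Nat) (hlb : lb ≤ k) (hk : k < cs.length) :
    (cs.drop lb).take (k + 1 - lb) = (cs.drop lb).take (k - lb) ++ [cs[k]] := by
  have h1 : k + 1 - lb = (k - lb) + 1 := by omega
  rw [h1, List.take_add_one]
  congr 1
  have h2 : (cs.drop lb)[k - lb]? = cs[lb + (k - lb)]? := List.getElem?_drop
  rw [h2, show lb + (k - lb) = k by omega]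
  simp [hk]

-- evaluation rules for A's loop body
lemma step1_space (str : String) (s : List String × Bool × Int) (i : Int)
    (h1 : PySem.Str.pyGet? str i = some ' ') (h2 : s.2.1 = false) :
    splitBlankStep1 str s i
      = (s.1 ++ [PySem.Str.replace (PySem.Str.slice str (some s.2.2) (some i)) "\"" ""],
         s.2.1, i + 1) := by
  have h1' : PySem.List.pyGet? str.toList i = some ' ' := by simpa using h1
  simp [splitBlankStep1, h1', h2]

lemma step1_quote (str : String) (s : List String × Bool × Int) (i : Int)
    (h1 : PySem.Str.pyGet? str i = some '"') :
    splitBlankStep1 str s i = (s.1, !s.2.1, s.2.2) := by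
  have h1' : PySem.List.pyGet? str.toList i = some '"' := by simpa using h1
  cases hm : s.2.1 <;> simp [splitBlankStep1, h1', hm]

lemma step1_other (str : String) (s : List String × Bool × Int) (i : Int)
    (h1 : ¬ (PySem.Str.pyGet? str i = some ' ' ∧ s.2.1 = false))
    (h2 : ¬ PySem.Str.pyGet? str i = some '"') :
    splitBlankStep1 str s i = s := by
  have h1' : ¬ (PySem.List.pyGet? str.toList i = some ' ' ∧ s.2.1 = false) := by simpa using h1
  have h2' : ¬ PySem.List.pyGet? str.toList i = some '"' := by simpa using h2
  simp [splitBlankStep1, h1', h2']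

lemma stepA_last (str : String) (n : Int) (s : List String × Bool × Int) (i : Int)
    (h : i + 1 = n) :
    splitBlankStep str n s i
      = ((splitBlankStep1 str s i).1 ++
          [PySem.Str.replace
            (PySem.Str.slice str (some (splitBlankStep1 str s i).2.2) (some (i + 1))) "\"" ""],
         (splitBlankStep1 str s i).2.1, (splitBlankStep1 str s i).2.2) := by
  simp [splitBlankStep, h]

lemma stepA_cont (str : String) (n : Int) (s : List String × Bool × Int) (i : Int)
    (h : ¬ i + 1 = n) :
    splitBlankStep str n s i = splitBlankStep1 str s i := by
  simp [splitBlankStep, h]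

-- evaluation rules for B's loop body
lemma altStep_quote (s : List String × List Char × Bool) :
    splitBlankAltStep s '"' = (s.1, s.2.1, !s.2.2) := by
  simp [splitBlankAltStep]

lemma altStep_space (s : List String × List Char × Bool) (h : s.2.2 = false) :
    splitBlankAltStep s ' ' = (s.1 ++ [String.ofList s.2.1], [], s.2.2) := by
  simp [splitBlankAltStep, h]

lemma altStep_other (s : List String × List Char × Bool) (c : Char)
    (hq : ¬ c = '"') (h : ¬ (c = ' ' ∧ s.2.2 = false)) :
    splitBlankAltStep s c = (s.1, s.2.1 ++ [c], s.2.2) := by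
  simp [splitBlankAltStep, hq, h]

-- main loop invariant: A's remaining index loop from position k agrees with B's remaining
-- char loop, provided B's buffer holds the de-quoted slice str[lastBlank:k]
lemma loop_inv (str : String) :
    ∀ (rest : List Char) (k lb : Nat) (res : List String) (inMark : Bool),
      str.toList.drop k = rest → lb ≤ k → k < str.toList.length →
      ((PySem.List.pyRange (k : Int) (PySem.Str.len str) 1).foldl
          (splitBlankStep str (PySem.Str.len str))
          (res, inMark, (lb : Int))).1
        = (let t := rest.foldl splitBlankAltStep
              (res, ((str.toList.drop lb).take (k - lb)).filter (fun c => !(c == '"')), inMark)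
           t.1 ++ [String.ofList t.2.1]) := by
  intro rest
  induction rest with
  | nil =>
    intro k lb res inMark hdrop hlb hk
    exfalso
    have := List.drop_eq_nil_iff.mp hdrop
    omega
  | cons c rest ih =>
    intro k lb res inMark hdrop hlb hk
    have hck : str.toList[k]? = some c := by
      have h0 : (str.toList.drop k)[0]? = some c := by rw [hdrop]; rfl
      rw [List.getElem?_drop] at h0
      simpa using h0
    have hgetc : str.toList[k] = c := by
      have := List.getElem?_eq_getElem hk
      rw [this] at hck; exact Option.some.inj hck
    have hdrop' : str.toList.drop (k + 1) = rest := by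
      rw [← List.drop_drop, hdrop]; simp
    have hlen : PySem.Str.len str = (str.toList.length : Int) := by
      simp [PySem.Str.len]
    have hrange : PySem.List.pyRange (k : Int) (PySem.Str.len str) 1
        = (k : Int) :: PySem.List.pyRange ((k : Int) + 1) (PySem.Str.len str) 1 := by
      rw [hlen]
      exact PySem.List.pyRange_one_cons (by exact_mod_cast hk)
    have hget : PySem.Str.pyGet? str (k : Int) = some c := by
      simp [hck]
    have hcast : ((k : Int) + 1) = (((k + 1 : Nat)) : Int) := by push_cast; ring
    rw [hrange, List.foldl_cons, List.foldl_cons]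
    by_cases hlast : k + 1 = str.toList.length
    · -- last iteration of A's loop: the trailing `if i+1 == len(str)` append fires
      have hrest : rest = [] := by
        rw [← hdrop', hlast, List.drop_length]
      subst hrest
      have hrange2 : PySem.List.pyRange ((k : Int) + 1) (PySem.Str.len str) 1 = [] := by
        rw [hlen]
        exact PySem.List.pyRange_one_eq_nil (by exact_mod_cast hlast.ge)
      have hEq : ((k : Int) + 1 = PySem.Str.len str) := by
        rw [hlen]; exact_mod_cast hlast
      rw [hrange2]
      simp only [List.foldl_nil]
      by_cases hsp : c = ' ' ∧ inMark = false
      · obtain ⟨hc, hm⟩ := hsp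
        subst hc; subst hm
        rw [stepA_last str _ _ _ hEq, step1_space str _ _ hget rfl]
        dsimp only
        rw [altStep_space _ rfl]
        dsimp only
        rw [hcast, token_eq str lb k, token_eq str (k + 1) (k + 1)]
        simp
      · by_cases hc : c = '"'
        · subst hc
          have hbuf : ((str.toList.drop lb).take (k + 1 - lb)).filter (fun c => !(c == '"'))
              = ((str.toList.drop lb).take (k - lb)).filter (fun c => !(c == '"')) := by
            rw [seg_succ str.toList lb k hlb hk, hgetc]
            simp
          rw [stepA_last str _ _ _ hEq, step1_quote str _ _ hget]
          dsimp only
          rw [altStep_quote]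
          dsimp only
          rw [hcast, token_eq str lb (k + 1), hbuf]
        · have hbuf : ((str.toList.drop lb).take (k + 1 - lb)).filter (fun c => !(c == '"'))
              = ((str.toList.drop lb).take (k - lb)).filter (fun c => !(c == '"')) ++ [c] := by
            rw [seg_succ str.toList lb k hlb hk, hgetc]
            simp [hc]
          have hno1 : ¬ (PySem.Str.pyGet? str (k : Int) = some ' '
              ∧ ((res, inMark, (lb : Int)) : List String × Bool × Int).2.1 = false) := by
            intro h
            have h1 := h.1
            rw [hget] at h1
            exact hsp ⟨Option.some.inj h1, h.2⟩
          have hno2 : ¬ PySem.Str.pyGet? str (k : Int) = some '"' := by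
            intro h1
            rw [hget] at h1
            exact hc (Option.some.inj h1)
          rw [stepA_last str _ _ _ hEq, step1_other str _ _ hno1 hno2]
          dsimp only
          rw [altStep_other _ _ hc hsp]
          dsimp only
          rw [hcast, token_eq str lb (k + 1), hbuf]
    · -- A's loop continues: apply the induction hypothesis at k+1
      have hklt : k + 1 < str.toList.length := by omega
      have hne : ¬ ((k : Int) + 1 = PySem.Str.len str) := by
        rw [hlen]; intro h; exact hlast (by exact_mod_cast h)
      by_cases hsp : c = ' ' ∧ inMark = false
      · obtain ⟨hc, hm⟩ := hsp
        subst hc; subst hm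
        rw [stepA_cont str _ _ _ hne, step1_space str _ _ hget rfl]
        dsimp only
        rw [hcast, ih (k + 1) (k + 1) _ false hdrop' (le_refl _) hklt]
        rw [altStep_space _ rfl]
        dsimp only
        rw [token_eq str lb k]
        simp
      · by_cases hc : c = '"'
        · subst hc
          have hbuf : ((str.toList.drop lb).take (k + 1 - lb)).filter (fun c => !(c == '"'))
              = ((str.toList.drop lb).take (k - lb)).filter (fun c => !(c == '"')) := by
            rw [seg_succ str.toList lb k hlb hk, hgetc]
            simp
          rw [stepA_cont str _ _ _ hne, step1_quote str _ _ hget]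
          dsimp only
          rw [hcast, ih (k + 1) lb _ (!inMark) hdrop' (by omega) hklt, hbuf]
          rw [altStep_quote]
        · have hbuf : ((str.toList.drop lb).take (k + 1 - lb)).filter (fun c => !(c == '"'))
              = ((str.toList.drop lb).take (k - lb)).filter (fun c => !(c == '"')) ++ [c] := by
            rw [seg_succ str.toList lb k hlb hk, hgetc]
            simp [hc]
          have hno1 : ¬ (PySem.Str.pyGet? str (k : Int) = some ' '
              ∧ ((res, inMark, (lb : Int)) : List String × Bool × Int).2.1 = false) := by
            intro h
            have h1 := h.1
            rw [hget] at h1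
            exact hsp ⟨Option.some.inj h1, h.2⟩
          have hno2 : ¬ PySem.Str.pyGet? str (k : Int) = some '"' := by
            intro h1
            rw [hget] at h1
            exact hc (Option.some.inj h1)
          rw [stepA_cont str _ _ _ hne, step1_other str _ _ hno1 hno2]
          rw [hcast, ih (k + 1) lb _ inMark hdrop' (by omega) hklt, hbuf]
          rw [altStep_other _ _ hc hsp]

-- ===== VERDICT (by name: the statement is the Claim_ definition above) =====
theorem splitBlank_spec : Claim_equal_splitBlank := by
  intro str _
  show splitBlank str = splitBlank_alt str
  by_cases hnil : str.toList = []
  · have hlen : PySem.Str.len str = 0 := by simp [PySem.Str.len, hnil]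
    simp [splitBlank, splitBlank_alt, hnil]
  · have hpos : 0 < str.toList.length := List.length_pos_iff.mpr hnil
    have h := loop_inv str str.toList 0 0 [] false (by simp) (le_refl _) hpos
    rw [show ((0 : Nat) : Int) = (0 : Int) by simp] at h
    rw [splitBlank, h]
    simp [splitBlank_alt, hnil]
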